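-- pv_equiv track=rewrite | github.com/JoaoLMPereira/acx-acronym-expander | acrodisam/DatasetParsers/process_tokens_and_bio_tags.py | biouless_to_bio
-- ===== SOURCE A (Python) =====
-- def biouless_to_bio(tags):
--     """Receives a list with tags of type "U-long","U-short" or "O" and transforms it into a list of BIO tags.
--
--     The BIO tag format is comprised of three tags: "B"(beginning), "I"(inside), "O"(outside).
--
--     For example:
--         input list: ["U-long","U-long","U-long","O","O","U-short","U-short","U-short","O"]
--         output list: ["B-long","I-long","I-long","O","O","B-short","I-short","I-short","O"]
--
--     Args:
--         tags (list): a list of tags that are in the BIOUL format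
--
--     Returns:
--         list: a list of tags derived from the input list. The list returned contains BIO tags.
--     """
--     fixed = []
--     cont = None
--     for tag in tags:
--         if tag == "O":
--             fixed.append(tag)
--             cont = None
--         else:
--             if cont == tag:
--                 fixed.append(tag.replace("U", "I"))
--             else:
--                 fixed.append(tag.replace("U", "B"))
--                 cont = tag
--     return fixed
-- ===== SOURCE B (Python) =====
-- def biouless_to_bio(tags):
--     """Convert BIOUL-style tags to BIO tags, run by run.
--
--     Splits the input into maximal runs of identical tags with a two-pointer
--     scan; an "O" run is copied as is, any other run becomes one
--     tag.replace("U", "B") followed by tag.replace("U", "I") for the rest.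
--     """
--     out = []
--     i = 0
--     n = len(tags)
--     while i < n:
--         tag = tags[i]
--         j = i + 1
--         while j < n and tags[j] == tag:
--             j += 1
--         run = j - i
--         if tag == "O":
--             out += ["O"] * run
--         else:
--             out += [tag.replace("U", "B")] + [tag.replace("U", "I")] * (run - 1)
--         i = j
--     return out
-- ===== Notes on version B (the rewrite author's own statement) =====
-- stated objective: alternative
-- what changed: Replaces A's single element-wise pass with a carried 'cont' state by a two-pointer scan over maximal runs of identical tags, emitting each run's output as a block.
import Mathlib
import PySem

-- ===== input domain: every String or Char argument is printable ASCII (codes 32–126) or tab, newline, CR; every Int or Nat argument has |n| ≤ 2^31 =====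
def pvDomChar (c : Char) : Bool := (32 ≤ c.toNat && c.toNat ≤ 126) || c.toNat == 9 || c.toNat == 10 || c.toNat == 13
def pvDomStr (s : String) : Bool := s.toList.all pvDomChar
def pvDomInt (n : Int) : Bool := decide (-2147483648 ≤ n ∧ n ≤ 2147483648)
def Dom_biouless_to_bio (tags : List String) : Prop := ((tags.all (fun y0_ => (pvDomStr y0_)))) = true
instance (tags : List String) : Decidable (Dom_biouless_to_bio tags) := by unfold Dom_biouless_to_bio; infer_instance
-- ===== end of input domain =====

-- B replaces A's element-wise pass with carried state by a run-based two-pointer scan (objective: alternative).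

-- ===== PORT A =====
-- A: one fold over the tags carrying (fixed, cont); pvStepA is the loop body.
def pvStepA (st : List String × Option String) (tag : String) : List String × Option String :=
  if tag == "O" then (st.1 ++ [tag], none)
  else if st.2 == some tag then (st.1 ++ [PySem.Str.replace tag "U" "I"], st.2)
  else (st.1 ++ [PySem.Str.replace tag "U" "B"], some tag)

def biouless_to_bio (tags : List String) : List String :=
  (tags.foldl pvStepA ([], none)).1

-- ===== PORT B =====
-- B: split off the maximal run of the head tag (the inner `while j < n and tags[j] == tag`
-- two-pointer scan = takeWhile/dropWhile on the remaining suffix), emit its block, recurse on the rest.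
def biouless_to_bio_alt (tags : List String) : List String :=
  match tags with
  | [] => []
  | t :: rest =>
      let m := (rest.takeWhile (· == t)).length
      let tail := rest.dropWhile (· == t)
      (if t == "O" then List.replicate (m + 1) "O"
       else PySem.Str.replace t "U" "B" :: List.replicate m (PySem.Str.replace t "U" "I"))
      ++ biouless_to_bio_alt tail
termination_by tags.length
decreasing_by
  have := List.length_dropWhile_le (· == t) rest
  simp only [List.length_cons]
  omega

-- ===== PRECONDITION & SPEC =====
def Spec_biouless_to_bio (tags : List String) (out : List String) : Prop := out = biouless_to_bio_alt tags
instance (tags : List String) (out : List String) : Decidable (Spec_biouless_to_bio tags out) := by unfold Spec_biouless_to_bio; infer_instance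

-- ===== CLAIM (what is proved, stated in full; the proofs are below) =====
def Claim_equal_biouless_to_bio : Prop := ∀ (tags : List String), Dom_biouless_to_bio tags → Spec_biouless_to_bio tags (biouless_to_bio tags)

-- ===== LEMMAS AND PROOFS =====

-- A's loop body, as a structural recursion on (cont, remaining tags), emitting only the new output.
def aBio : Option String → List String → List String
  | _, [] => []
  | cont, t :: rest =>
      if t == "O" then "O" :: aBio none rest
      else if cont == some t then PySem.Str.replace t "U" "I" :: aBio (some t) rest
      else PySem.Str.replace t "U" "B" :: aBio (some t) rest

-- A's fold appends aBio's output to the accumulator.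
theorem foldl_eq_aBio (l : List String) (acc : List String) (cont : Option String) :
    (l.foldl pvStepA (acc, cont)).1 = acc ++ aBio cont l := by
  induction l generalizing acc cont with
  | nil => simp [aBio]
  | cons t rest ih =>
      rw [List.foldl_cons]
      by_cases hO : t = "O"
      · subst hO
        have hstep : pvStepA (acc, cont) "O" = (acc ++ ["O"], none) := by simp [pvStepA]
        rw [hstep, ih]; simp [aBio]
      · by_cases hc : cont = some t
        · subst hc
          have hstep : pvStepA (acc, some t) t
              = (acc ++ [PySem.Str.replace t "U" "I"], some t) := by simp [pvStepA, hO]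
          rw [hstep, ih]; simp [aBio, hO]
        · have hstep : pvStepA (acc, cont) t
              = (acc ++ [PySem.Str.replace t "U" "B"], some t) := by simp [pvStepA, hO, hc]
          rw [hstep, ih]; simp [aBio, hO, hc]

-- After a maximal run of t, the head of the rest differs from t, so cont = some t is inert.
theorem aBio_cont_irrel (t : String) (l : List String) (h : ∀ u, l.head? = some u → u ≠ t) :
    aBio (some t) l = aBio none l := by
  cases l with
  | nil => rfl
  | cons u xs =>
      have hut : u ≠ t := h u rfl
      by_cases hO : u = "O"
      · subst hO; simp [aBio]
      · simp [aBio, hO, Ne.symm hut]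

-- aBio consumes a run of "O"s one by one.
theorem aBio_O_run (m : ℕ) (l : List String) :
    aBio none (List.replicate m "O" ++ l) = List.replicate m "O" ++ aBio none l := by
  induction m with
  | zero => simp
  | succ k ih => simp [List.replicate_succ, aBio, ih]

-- aBio with cont = some t consumes a run of t (t ≠ "O") as "I"-tags.
theorem aBio_run (t : String) (ht : t ≠ "O") (m : ℕ) (l : List String) :
    aBio (some t) (List.replicate m t ++ l)
      = List.replicate m (PySem.Str.replace t "U" "I") ++ aBio (some t) l := by
  induction m with
  | zero => simp
  | succ k ih => simp [List.replicate_succ, aBio, ht, ih]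

-- B's run decomposition computes aBio, by strong induction on a length bound.
theorem alt_eq_aBio_bounded : ∀ (n : ℕ) (tags : List String), tags.length ≤ n →
    biouless_to_bio_alt tags = aBio none tags := by
  intro n
  induction n with
  | zero =>
      intro tags h
      have : tags = [] := List.eq_nil_of_length_eq_zero (Nat.le_zero.mp h)
      subst this
      rw [biouless_to_bio_alt]; rfl
  | succ k ih =>
      intro tags h
      cases tags with
      | nil => rw [biouless_to_bio_alt]; rfl
      | cons t rest =>
          rw [biouless_to_bio_alt]
          set m := (rest.takeWhile (· == t)).length with hm
          set tail := rest.dropWhile (· == t) with htl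
          have hrep : rest.takeWhile (· == t) = List.replicate m t := by
            rw [List.eq_replicate_iff]
            refine ⟨rfl, fun b hb => ?_⟩
            have := List.mem_takeWhile_imp hb
            simpa [beq_iff_eq] using this
          have hsplit : rest = List.replicate m t ++ tail := by
            conv_lhs => rw [← List.takeWhile_append_dropWhile (p := (· == t)) (l := rest)]
            rw [hrep]
          have hlen : tail.length ≤ k := by
            have h1 : tail.length ≤ rest.length := by rw [htl]; exact List.length_dropWhile_le _ rest
            simp only [List.length_cons] at h
            omega
          have hhead : ∀ u, tail.head? = some u → u ≠ t := by
            intro u hu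
            have : ¬ ((u == t) = true) := by
              cases htail : tail with
              | nil => simp [htail] at hu
              | cons v vs =>
                  have hv := List.head_dropWhile_not (p := (· == t)) (l := rest)
                    (by rw [← htl, htail]; simp)
                  rw [htail] at hu
                  simp at hu
                  subst hu
                  simpa [← htl, htail] using hv
            simpa [beq_iff_eq] using this
          rw [ih tail hlen]
          by_cases hO : t = "O"
          · subst hO
            simp only [beq_self_eq_true, if_true]
            rw [hsplit, List.replicate_succ, List.cons_append]
            show List.replicate (m+1) "O" ++ aBio none tail = aBio none ("O" :: (List.replicate m "O" ++ tail))
            simp [aBio, List.replicate_succ, aBio_O_run]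
          · simp only [beq_iff_eq, hO, if_false]
            rw [hsplit]
            show _ = aBio none (t :: (List.replicate m t ++ tail))
            have hnone : ((none : Option String) == some t) = false := rfl
            simp only [aBio, beq_iff_eq, hO, if_false, hnone, Bool.false_eq_true, List.cons_append]
            rw [aBio_run t hO m tail, aBio_cont_irrel t tail hhead]

-- ===== VERDICT (by name: the statement is the Claim_ definition above) =====
theorem biouless_to_bio_spec : Claim_equal_biouless_to_bio := by
  intro tags _
  show biouless_to_bio tags = biouless_to_bio_alt tags
  rw [biouless_to_bio, foldl_eq_aBio, alt_eq_aBio_bounded tags.length tags le_rfl]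
  simp
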